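-- pv_equiv track=rewrite | github.com/pathak-aman/pdf_contract_parser | parsers/rules_parser.py | split_into_lines_by_page
-- ===== SOURCE A (Python) =====
-- from typing import List, Tuple, Optional
--
-- def split_into_lines_by_page(pages: List[str]) -> List[List[str]]:
--     out = []
--     for p in pages:
--         lines = p.split('\n')
--         stripped = [ln.strip() for ln in lines]
--         stabilized = []
--         prev_empty = False
--         for ln in stripped:
--             is_empty = (ln == "")
--             if is_empty and prev_empty:
--                 continue
--             stabilized.append(ln)
--             prev_empty = is_empty
--         out.append(stabilized)
--     return out
-- ===== SOURCE B (Python) =====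
-- from itertools import groupby
-- from typing import List
--
--
-- def split_into_lines_by_page(pages: List[str]) -> List[List[str]]:
--     out = []
--     for p in pages:
--         stripped = [ln.strip() for ln in p.split('\n')]
--         page_out = []
--         for is_blank, grp in groupby(stripped, key=lambda ln: ln == ""):
--             if is_blank:
--                 page_out.append("")
--             else:
--                 page_out.extend(grp)
--         out.append(page_out)
--     return out
-- ===== Notes on version B (the rewrite author's own statement) =====
-- stated objective: idiomatic
-- what changed: Replaces the stateful prev_empty flag loop with an itertools.groupby run-grouping traversal: each blank run contributes one empty string, each non-blank run is emitted whole.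
import Mathlib
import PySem

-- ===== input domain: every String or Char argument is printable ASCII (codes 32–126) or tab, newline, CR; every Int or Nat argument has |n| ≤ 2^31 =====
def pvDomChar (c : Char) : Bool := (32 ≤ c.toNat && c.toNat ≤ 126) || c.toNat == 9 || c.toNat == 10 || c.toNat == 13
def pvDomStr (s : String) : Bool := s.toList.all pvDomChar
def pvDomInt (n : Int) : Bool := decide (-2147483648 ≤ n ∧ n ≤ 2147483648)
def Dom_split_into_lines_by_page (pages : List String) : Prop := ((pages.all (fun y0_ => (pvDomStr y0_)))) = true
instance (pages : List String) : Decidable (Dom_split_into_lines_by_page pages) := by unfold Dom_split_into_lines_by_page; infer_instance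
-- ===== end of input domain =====

-- B replaces A's stateful prev_empty flag loop with a run-grouping (groupby) traversal; objective: idiomatic.


-- ===== PORT A =====
-- A's inner loop: state (stabilized, prev_empty), skip a blank line after a blank line.
def pvStepA (st : List String × Bool) (ln : String) : List String × Bool :=
  let isEmpty := ln == ""
  if isEmpty && st.2 then st
  else (st.1 ++ [ln], isEmpty)

def split_into_lines_by_page (pages : List String) : List (List String) :=
  pages.foldl (fun out p =>
    let lines := (PySem.Chars.splitOn p.toList "\n".toList).map String.ofList  -- p.split('\n'), sep ≠ ""
    let stripped := lines.map PySem.Str.strip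
    let stabilized := (stripped.foldl pvStepA ([], false)).1
    out ++ [stabilized]) []

-- ===== PORT B =====
-- itertools.groupby over the stripped lines, keyed on emptiness: maximal runs with their key.
def pvGroupRuns : List String → List (Bool × List String)
  | [] => []
  | x :: xs =>
    let k := x == ""
    (k, x :: xs.takeWhile (fun y => (y == "") == k)) ::
      pvGroupRuns (xs.dropWhile (fun y => (y == "") == k))
termination_by l => l.length
decreasing_by simpa using Nat.lt_succ_of_le (List.length_dropWhile_le _ _)

def split_into_lines_by_page_alt (pages : List String) : List (List String) :=
  pages.map (fun p =>
    let stripped := ((PySem.Chars.splitOn p.toList "\n".toList).map String.ofList).map PySem.Str.strip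
    (pvGroupRuns stripped).flatMap (fun g => if g.1 then [""] else g.2))

-- ===== PRECONDITION & SPEC =====
def Spec_split_into_lines_by_page (pages : List String) (out : List (List String)) : Prop := out = split_into_lines_by_page_alt pages
instance (pages : List String) (out : List (List String)) : Decidable (Spec_split_into_lines_by_page pages out) := by unfold Spec_split_into_lines_by_page; infer_instance

-- ===== CLAIM (what is proved, stated in full; the proofs are below) =====
def Claim_equal_split_into_lines_by_page : Prop := ∀ (pages : List String), Dom_split_into_lines_by_page pages → Spec_split_into_lines_by_page pages (split_into_lines_by_page pages)

-- ===== LEMMAS AND PROOFS =====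

-- With prev_empty = true, A's loop skips leading blanks: equal to starting fresh after dropWhile.
theorem pvFold_true (xs : List String) (acc : List String) :
    (xs.foldl pvStepA (acc, true)).1
      = ((xs.dropWhile (fun y => (y == "") == true)).foldl pvStepA (acc, false)).1 := by
  induction xs generalizing acc with
  | nil => rfl
  | cons x xs ih =>
    by_cases hx : x = ""
    · subst hx
      simpa [pvStepA, List.dropWhile] using ih acc
    · have hxb : (x == "") = false := by simp [hx]
      simp [pvStepA, List.dropWhile, hxb]

-- A's loop passes a non-blank run straight through (prev_empty stays false).
theorem pvFold_run (run : List String) (h : ∀ y ∈ run, (y == "") = false)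
    (r acc : List String) :
    ((run ++ r).foldl pvStepA (acc, false)).1 = (r.foldl pvStepA (acc ++ run, false)).1 := by
  induction run generalizing acc with
  | nil => simp
  | cons x run ih =>
    have hx : (x == "") = false := h x (by simp)
    have hrest : ∀ y ∈ run, (y == "") = false := fun y hy => h y (by simp [hy])
    simp only [List.cons_append, List.foldl_cons, pvStepA, hx, Bool.false_and]
    simpa [List.append_assoc] using ih hrest (acc ++ [x])

-- Main per-page lemma: A's flag loop equals B's group traversal.
theorem pvFold_eq_groups (xs : List String) (acc : List String) :
    (xs.foldl pvStepA (acc, false)).1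
      = acc ++ (pvGroupRuns xs).flatMap (fun g => if g.1 then [""] else g.2) := by
  match xs with
  | [] => simp [pvGroupRuns]
  | x :: xs =>
    by_cases hx : x = ""
    · subst hx
      rw [pvGroupRuns]
      have ih := pvFold_eq_groups (xs.dropWhile (fun y => (y == "") == true)) (acc ++ [""])
      simp only [List.foldl_cons]
      rw [show pvStepA (acc, false) "" = (acc ++ [""], true) from rfl]
      rw [pvFold_true, ih]
      simp [List.flatMap_cons]
    · have hxb : (x == "") = false := by simp [hx]
      rw [pvGroupRuns]
      simp only [hxb]
      have hsplit : xs = xs.takeWhile (fun y => (y == "") == false)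
          ++ xs.dropWhile (fun y => (y == "") == false) := (List.takeWhile_append_dropWhile).symm
      have hrun : ∀ y ∈ xs.takeWhile (fun y => (y == "") == false), (y == "") = false := by
        intro y hy
        have := List.mem_takeWhile_imp hy
        simpa using this
      have ih := pvFold_eq_groups (xs.dropWhile (fun y => (y == "") == false))
        ((acc ++ [x]) ++ xs.takeWhile (fun y => (y == "") == false))
      calc ((x :: xs).foldl pvStepA (acc, false)).1
          = (xs.foldl pvStepA (acc ++ [x], false)).1 := by
            simp [pvStepA, hxb]
        _ = ((xs.takeWhile (fun y => (y == "") == false)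
              ++ xs.dropWhile (fun y => (y == "") == false)).foldl pvStepA (acc ++ [x], false)).1 := by
            rw [← hsplit]
        _ = ((xs.dropWhile (fun y => (y == "") == false)).foldl pvStepA
              ((acc ++ [x]) ++ xs.takeWhile (fun y => (y == "") == false), false)).1 :=
            pvFold_run _ hrun _ _
        _ = _ := by
            rw [ih]
            simp [List.flatMap_cons, List.append_assoc]
termination_by xs.length
decreasing_by
  · simpa using Nat.lt_succ_of_le (List.length_dropWhile_le _ _)
  · simpa using Nat.lt_succ_of_le (List.length_dropWhile_le _ _)

-- ===== VERDICT (by name: the statement is the Claim_ definition above) =====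
theorem split_into_lines_by_page_spec : Claim_equal_split_into_lines_by_page := by
  intro pages hd
  clear hd
  unfold Spec_split_into_lines_by_page split_into_lines_by_page split_into_lines_by_page_alt
  induction pages using List.reverseRecOn with
  | nil => rfl
  | append_singleton ps p ih =>
    rw [List.foldl_append, List.map_append, ih]
    simp [pvFold_eq_groups _ []]
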